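-- pv_equiv track=rewrite | github.com/tomerkeizler/Fantaze | server/create_team/create_team.py | get_possible_rounds
-- ===== SOURCE A (Python) =====
-- from collections import OrderedDict
--
-- def get_possible_rounds(round):
--     rounds = []
--     switcher = OrderedDict([
--         ("Group Stage - 1" , 0),
--         ("Group Stage - 2" , 1),
--         ("Group Stage - 3" , 2),
--         ("Group Stage - 4" , 3),
--         ("Group Stage - 5" , 4),
--         ("Group Stage - 6" , 5),
--         ("8th Finals" , 6),
--         ("Quarter-finals" , 7),
--         ("Semi-finals" , 8),
--         ("Final" , 9)
--     ])
--
--     for level in switcher: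
--         rounds.append(level)
--
--     level = switcher.get(round)
--     possible_rounds = rounds[:level]
--     return possible_rounds
-- ===== SOURCE B (Python) =====
-- # Different structure: instead of an ordered list indexed and sliced, keep the
-- # schedule as a predecessor chain and walk BACKWARDS from the given round,
-- # collecting rounds back-to-front, then reverse.  An unknown round means every
-- # round (including the Final) is possible, so the walk starts at "Final".
-- PREV = {
--     "Group Stage - 1": None,
--     "Group Stage - 2": "Group Stage - 1",
--     "Group Stage - 3": "Group Stage - 2",
--     "Group Stage - 4": "Group Stage - 3",
--     "Group Stage - 5": "Group Stage - 4",
--     "Group Stage - 6": "Group Stage - 5",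
--     "8th Finals": "Group Stage - 6",
--     "Quarter-finals": "8th Finals",
--     "Semi-finals": "Quarter-finals",
--     "Final": "Semi-finals",
-- }
--
--
-- def get_possible_rounds(round):
--     out = []
--     cur = PREV.get(round, "Final")
--     while cur is not None:
--         out.append(cur)
--         cur = PREV[cur]
--     out.reverse()
--     return out
-- ===== Notes on version B (the rewrite author's own statement) =====
-- stated objective: alternative
-- what changed: Replaces the ordered round list plus OrderedDict index and slice with a predecessor-chain (linked-list) representation walked backwards from the given round, building the result back-to-front and reversing it; an unknown round starts the walk at the Final, reproducing A's full-list result for rounds[:None].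
import Mathlib
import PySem

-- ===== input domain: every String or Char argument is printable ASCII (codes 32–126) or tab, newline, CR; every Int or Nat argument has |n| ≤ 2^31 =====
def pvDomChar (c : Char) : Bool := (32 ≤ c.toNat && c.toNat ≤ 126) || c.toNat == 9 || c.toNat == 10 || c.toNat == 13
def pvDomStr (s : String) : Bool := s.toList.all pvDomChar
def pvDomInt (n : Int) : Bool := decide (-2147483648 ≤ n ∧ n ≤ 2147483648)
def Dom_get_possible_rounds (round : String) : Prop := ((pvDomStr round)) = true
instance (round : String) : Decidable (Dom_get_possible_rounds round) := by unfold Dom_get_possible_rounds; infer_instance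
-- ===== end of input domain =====

-- B keeps the schedule as a predecessor chain walked backwards from the given round
-- (building back-to-front, then reversing) instead of A's ordered list + index + slice.

-- ===== PORT A =====
def get_possible_rounds (round : String) : List String :=
  let switcher : PySem.Dict String Int := PySem.Dict.ofList [
    ("Group Stage - 1", 0),
    ("Group Stage - 2", 1),
    ("Group Stage - 3", 2),
    ("Group Stage - 4", 3),
    ("Group Stage - 5", 4),
    ("Group Stage - 6", 5),
    ("8th Finals", 6),
    ("Quarter-finals", 7),
    ("Semi-finals", 8),
    ("Final", 9)]
  let rounds := switcher.keys.foldl (fun acc level => acc ++ [level]) []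
  let level := switcher.get? round
  -- rounds[:level] ; level = None gives the whole list, exactly Python's rounds[:None]
  PySem.List.slice rounds none level

-- ===== PORT B =====
def pvPrev : PySem.Dict String (Option String) := PySem.Dict.ofList [
  ("Group Stage - 1", none),
  ("Group Stage - 2", some "Group Stage - 1"),
  ("Group Stage - 3", some "Group Stage - 2"),
  ("Group Stage - 4", some "Group Stage - 3"),
  ("Group Stage - 5", some "Group Stage - 4"),
  ("Group Stage - 6", some "Group Stage - 5"),
  ("8th Finals", some "Group Stage - 6"),
  ("Quarter-finals", some "8th Finals"),
  ("Semi-finals", some "Quarter-finals"),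
  ("Final", some "Semi-finals")]

-- the while loop; fuel bounds the walk (the chain has length ≤ 10, so fuel 10 is exact).
-- PREV[cur] is always present (the chain is closed over pvPrev's keys), so getD cur none is exact.
def pvWalk (out : List String) : Option String → Nat → List String
  | none, _ => out
  | some _, 0 => out
  | some cur, fuel + 1 => pvWalk (out ++ [cur]) (pvPrev.getD cur none) fuel

def get_possible_rounds_alt (round : String) : List String :=
  (pvWalk [] (pvPrev.getD round (some "Final")) 10).reverse

-- ===== PRECONDITION & SPEC =====
def Spec_get_possible_rounds (round : String) (out : List String) : Prop := out = get_possible_rounds_alt round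
instance (round : String) (out : List String) : Decidable (Spec_get_possible_rounds round out) := by unfold Spec_get_possible_rounds; infer_instance

-- ===== CLAIM =====
def Claim_equal_get_possible_rounds : Prop := ∀ (round : String), Dom_get_possible_rounds round → Spec_get_possible_rounds round (get_possible_rounds round)

-- ===== LEMMAS AND PROOFS =====

-- ===== VERDICT =====
theorem get_possible_rounds_spec : Claim_equal_get_possible_rounds := by
  intro round _
  unfold Spec_get_possible_rounds
  by_cases h0 : round = "Group Stage - 1"; · subst h0; decide
  by_cases h1 : round = "Group Stage - 2"; · subst h1; decide
  by_cases h2 : round = "Group Stage - 3"; · subst h2; decide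
  by_cases h3 : round = "Group Stage - 4"; · subst h3; decide
  by_cases h4 : round = "Group Stage - 5"; · subst h4; decide
  by_cases h5 : round = "Group Stage - 6"; · subst h5; decide
  by_cases h6 : round = "8th Finals"; · subst h6; decide
  by_cases h7 : round = "Quarter-finals"; · subst h7; decide
  by_cases h8 : round = "Semi-finals"; · subst h8; decide
  by_cases h9 : round = "Final"; · subst h9; decide
  have hdA : (PySem.Dict.ofList [
    ("Group Stage - 1", (0:Int)), ("Group Stage - 2", 1), ("Group Stage - 3", 2),
    ("Group Stage - 4", 3), ("Group Stage - 5", 4), ("Group Stage - 6", 5),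
    ("8th Finals", 6), ("Quarter-finals", 7), ("Semi-finals", 8), ("Final", 9)])
      = PySem.Dict.mk [
    ("Group Stage - 1", 0), ("Group Stage - 2", 1), ("Group Stage - 3", 2),
    ("Group Stage - 4", 3), ("Group Stage - 5", 4), ("Group Stage - 6", 5),
    ("8th Finals", 6), ("Quarter-finals", 7), ("Semi-finals", 8), ("Final", 9)] := by decide
  have hdB : pvPrev = PySem.Dict.mk [
    ("Group Stage - 1", none), ("Group Stage - 2", some "Group Stage - 1"),
    ("Group Stage - 3", some "Group Stage - 2"), ("Group Stage - 4", some "Group Stage - 3"),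
    ("Group Stage - 5", some "Group Stage - 4"), ("Group Stage - 6", some "Group Stage - 5"),
    ("8th Finals", some "Group Stage - 6"), ("Quarter-finals", some "8th Finals"),
    ("Semi-finals", some "Quarter-finals"), ("Final", some "Semi-finals")] := by decide
  have hB : pvPrev.getD round (some "Final") = some "Final" := by
    simp [hdB, PySem.Dict.getD_eq_get?_getD, PySem.Dict.get?_mk_cons, PySem.Dict.get?,
      Ne.symm h0, Ne.symm h1, Ne.symm h2, Ne.symm h3, Ne.symm h4,
      Ne.symm h5, Ne.symm h6, Ne.symm h7, Ne.symm h8, Ne.symm h9]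
  simp only [get_possible_rounds, get_possible_rounds_alt, hdA, hB]
  simp [PySem.Dict.get?_mk_cons, PySem.Dict.get?, PySem.Dict.keys, PySem.List.slice_none_none,
    List.foldl, pvWalk,
    Ne.symm h0, Ne.symm h1, Ne.symm h2, Ne.symm h3, Ne.symm h4,
    Ne.symm h5, Ne.symm h6, Ne.symm h7, Ne.symm h8, Ne.symm h9]
  decide
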